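-- pv_equiv track=rewrite | github.com/Olamilekan5177/Detection | .history/dashboard/views_enhanced_20260220124313.py | detections_over_time
-- ===== SOURCE A (Python) =====
-- def detections_over_time(detections):
--     """Get detection counts over time (by day)"""
--     counts = {}
--
--     for det in detections:
--         timestamp = det.get('timestamp', '')
--         if timestamp:
--             date = timestamp.split('T')[0]
--             counts[date] = counts.get(date, 0) + 1
--
--     return sorted(counts.items())
-- ===== SOURCE B (Python) =====
-- def detections_over_time(detections):
--     """Get detection counts over time (by day): sort the dates, then count adjacent runs."""
--     dates = sorted(
--         det.get('timestamp', '').split('T')[0]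
--         for det in detections
--         if det.get('timestamp', '')
--     )
--     out = []
--     for d in dates:
--         if out and out[-1][0] == d:
--             out[-1] = (d, out[-1][1] + 1)
--         else:
--             out.append((d, 1))
--     return out
-- ===== Notes on version B (the rewrite author's own statement) =====
-- stated objective: alternative
-- what changed: Replaces the dict-counting pass followed by sorting the items with extracting the flat list of date strings, sorting it, and counting adjacent runs in one scan.
import Mathlib
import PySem

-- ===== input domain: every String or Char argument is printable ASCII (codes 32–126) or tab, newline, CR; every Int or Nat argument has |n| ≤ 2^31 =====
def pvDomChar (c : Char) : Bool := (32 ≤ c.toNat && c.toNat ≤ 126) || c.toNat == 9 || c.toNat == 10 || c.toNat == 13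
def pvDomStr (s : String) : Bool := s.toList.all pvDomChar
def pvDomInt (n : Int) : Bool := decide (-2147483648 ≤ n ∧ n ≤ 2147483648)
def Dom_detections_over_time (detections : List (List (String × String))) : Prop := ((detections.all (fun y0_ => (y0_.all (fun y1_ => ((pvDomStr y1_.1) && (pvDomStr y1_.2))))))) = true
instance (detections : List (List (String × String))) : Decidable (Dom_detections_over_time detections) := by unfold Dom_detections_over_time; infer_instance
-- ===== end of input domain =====

-- B changes the algorithm: instead of counting into a dict and sorting the items,
-- it sorts the flat list of dates and counts adjacent runs in one scan (alternative, same cost class).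

-- shared helpers for the two fragments both Python sources contain literally:
-- det.get('timestamp', '')
def pvTs (det : List (String × String)) : String := (PySem.Dict.mk det).getD "timestamp" ""
-- timestamp.split('T')[0]  (split? is some, and nonempty, since the separator "T" ≠ "")
def pvDate (timestamp : String) : String := ((PySem.Str.split? timestamp "T").getD []).headD ""

-- ===== PORT A =====
def detections_over_time (detections : List (List (String × String))) : List (String × Int) :=
  let counts := detections.foldl
    (fun counts det =>
      let timestamp := pvTs det
      if timestamp ≠ "" then
        let date := pvDate timestamp
        counts.insert date (counts.getD date 0 + 1)
      else counts)
    PySem.Dict.empty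
  PySem.List.sorted2 counts.items (fun p => p.1) (fun p => p.2)

-- ===== PORT B =====
-- out[-1] read with a default; the branch only uses it when out ≠ []
def pvStep (out : List (String × Int)) (d : String) : List (String × Int) :=
  if out ≠ [] ∧ (out.getLastD ("", 0)).1 = d then
    out.dropLast ++ [(d, (out.getLastD ("", 0)).2 + 1)]
  else
    out ++ [(d, 1)]

def detections_over_time_alt (detections : List (List (String × String))) : List (String × Int) :=
  let dates := detections.filterMap
    (fun det => let t := pvTs det; if t ≠ "" then some (pvDate t) else none)
  (PySem.List.sorted dates (fun x => x)).foldl pvStep []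

-- ===== PRECONDITION & SPEC =====
def Spec_detections_over_time (detections : List (List (String × String))) (out : List (String × Int)) : Prop := out = detections_over_time_alt detections
instance (detections : List (List (String × String))) (out : List (String × Int)) : Decidable (Spec_detections_over_time detections out) := by unfold Spec_detections_over_time; infer_instance

-- ===== CLAIM (what is proved, stated in full; the proofs are below) =====
def Claim_equal_detections_over_time : Prop := ∀ (detections : List (List (String × String))), Dom_detections_over_time detections → Spec_detections_over_time detections (detections_over_time detections)

-- ===== LEMMAS AND PROOFS =====

-- the date list both programs range over
def pvDates (detections : List (List (String × String))) : List String :=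
  detections.filterMap (fun det => let t := pvTs det; if t ≠ "" then some (pvDate t) else none)

-- A's loop over detections is the counting loop over the date list
theorem pvA_fold (detections : List (List (String × String))) (d0 : PySem.Dict String Int) :
    detections.foldl
      (fun counts det =>
        let timestamp := pvTs det
        if timestamp ≠ "" then
          let date := pvDate timestamp
          counts.insert date (counts.getD date 0 + 1)
        else counts) d0
    = (pvDates detections).foldl (fun d x => d.insert x (d.getD x 0 + 1)) d0 := by
  induction detections generalizing d0 with
  | nil => rfl
  | cons det rest ih =>
    rw [List.foldl_cons, ih]
    by_cases h : pvTs det = ""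
    · simp [pvDates, h]
    · simp [pvDates, h]

-- PySem.Set.ofList keeps a sublist of its argument
theorem pvOfList_sublist {α : Type} [BEq α] [LawfulBEq α] (xs : List α) :
    (PySem.Set.ofList xs).Sublist xs := by
  induction xs with
  | nil => simp [PySem.Set.ofList_nil]
  | cons x t ih =>
    rw [PySem.Set.ofList_cons]
    simp only [PySem.Set.discard]
    exact List.Sublist.cons₂ x (List.Sublist.trans (List.filter_sublist) ih)

-- ofList commutes with filter
theorem pvOfList_filter {α : Type} [BEq α] [LawfulBEq α] (p : α → Bool) (xs : List α) :
    PySem.Set.ofList (xs.filter p) = (PySem.Set.ofList xs).filter p := by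
  induction xs with
  | nil => simp [PySem.Set.ofList_nil]
  | cons x t ih =>
    rw [PySem.Set.ofList_cons]
    by_cases hp : p x = true
    · rw [List.filter_cons_of_pos hp, PySem.Set.ofList_cons, ih,
          List.filter_cons_of_pos hp]
      simp only [PySem.Set.discard, List.filter_filter]
      congr 1
      apply List.filter_congr
      intro a _
      rw [Bool.and_comm]
    · rw [List.filter_cons_of_neg (by simpa using hp), ih,
          List.filter_cons_of_neg (by simpa using hp)]
      simp only [PySem.Set.discard, List.filter_filter]
      apply List.filter_congr
      intro a _
      by_cases hax : a = x
      · subst hax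
        simp [Bool.eq_false_iff.2 hp]
      · simp [hax]

-- dedup of a weakly sorted list is strictly increasing
theorem pvPairwise_lt_ofList {α : Type} [BEq α] [LawfulBEq α] [LinearOrder α] (S : List α)
    (h : S.Pairwise (· ≤ ·)) : (PySem.Set.ofList S).Pairwise (· < ·) := by
  have hle : (PySem.Set.ofList S).Pairwise (· ≤ ·) := h.sublist (pvOfList_sublist S)
  exact (hle.and (PySem.Set.nodup_ofList S)).imp (fun {a b} hab => lt_of_le_of_ne hab.1 hab.2)

theorem pvStep_ne_nil (out : List (String × Int)) (d : String) : pvStep out d ≠ [] := by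
  unfold pvStep
  split_ifs <;> simp

-- pvStep only looks at the tail of the accumulator
theorem pvStep_append (a b : List (String × Int)) (d : String) (hb : b ≠ []) :
    pvStep (a ++ b) d = a ++ pvStep b d := by
  rcases List.eq_nil_or_concat b with rfl | ⟨l, e, rfl⟩
  · exact absurd rfl hb
  · unfold pvStep
    rw [List.concat_eq_append, ← List.append_assoc]
    simp only [List.getLastD_concat, List.dropLast_concat]
    split_ifs with h1 h2 h2 <;> simp_all

theorem pvFoldl_step_append (S : List String) (a b : List (String × Int)) (hb : b ≠ []) :
    S.foldl pvStep (a ++ b) = a ++ S.foldl pvStep b := by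
  induction S generalizing b with
  | nil => rfl
  | cons s S ih =>
    simp only [List.foldl_cons]
    rw [pvStep_append a b s hb, ih _ (pvStep_ne_nil b s)]

-- the run-counting loop on a sorted tail, with an open run (x, c)
theorem pvAux (S : List String) (hs : S.Pairwise (· ≤ ·)) (x : String) (c : Int)
    (hx : ∀ y ∈ S, x ≤ y) :
    S.foldl pvStep [(x, c)]
      = (x, c + S.count x)
        :: (PySem.Set.ofList (S.filter (fun y => !(y == x)))).map
             (fun k => (k, (S.count k : Int))) := by
  induction S generalizing x c with
  | nil => simp
  | cons y T ih =>
    rw [List.pairwise_cons] at hs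
    obtain ⟨hy, hT⟩ := hs
    by_cases hyx : y = x
    · subst hyx
      have hstep : pvStep [(y, c)] y = [(y, c + 1)] := by simp [pvStep]
      rw [List.foldl_cons, hstep, ih hT y (c + 1) hy]
      have hfil : (y :: T).filter (fun z => !(z == y)) = T.filter (fun z => !(z == y)) := by
        simp
      rw [hfil]
      congr 1
      · simp only [List.count_cons_self, Prod.mk.injEq, true_and]
        push_cast; ring
      · apply List.map_congr_left
        intro k hk
        have hkne : k ≠ y := by
          have := (PySem.Set.mem_ofList _ _).1 hk
          simp at this
          exact this.2
        simp [Ne.symm hkne]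
    · have hxy : x < y := lt_of_le_of_ne (hx y (by simp)) (Ne.symm hyx)
      have hstep : pvStep [(x, c)] y = [(x, c)] ++ [(y, 1)] := by
        simp [pvStep]
        exact fun h => hyx h.symm
      rw [List.foldl_cons, hstep, pvFoldl_step_append T [(x, c)] [(y, 1)] (by simp),
          ih hT y 1 hy]
      have hxT : ∀ t ∈ T, x < t := fun t ht => lt_of_lt_of_le hxy (hy t ht)
      have hcx : (y :: T).count x = 0 := by
        rw [List.count_eq_zero]
        intro hmem
        rcases List.mem_cons.1 hmem with rfl | hmem
        · exact hyx rfl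
        · exact absurd rfl (ne_of_gt (hxT x hmem))
      have hfil : (y :: T).filter (fun z => !(z == x)) = y :: T := by
        rw [List.filter_cons_of_pos (by simp; exact hyx)]
        congr 1
        apply List.filter_eq_self.2
        intro t ht
        simp [ne_of_gt (hxT t ht)]
      rw [hcx, hfil, PySem.Set.ofList_cons]
      simp only [List.cons_append, List.nil_append, List.map_cons]
      congr 1
      · simp
      congr 1
      · simp only [List.count_cons_self, Prod.mk.injEq, true_and]
        push_cast; ring
      · rw [show (PySem.Set.ofList T).discard y = (PySem.Set.ofList T).filter (fun z => !(z == y)) from rfl,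
            ← pvOfList_filter]
        apply List.map_congr_left
        intro k hk
        have hkne : k ≠ y := by
          have := (PySem.Set.mem_ofList _ _).1 hk
          simp at this
          exact this.2
        simp [Ne.symm hkne]

-- B's scan over a sorted list produces (distinct key, count) in first-occurrence order
theorem pvGroup (S : List String) (hs : S.Pairwise (· ≤ ·)) :
    S.foldl pvStep [] = (PySem.Set.ofList S).map (fun k => (k, (S.count k : Int))) := by
  cases S with
  | nil => rfl
  | cons x T =>
    rw [List.pairwise_cons] at hs
    obtain ⟨hx, hT⟩ := hs
    have hstep : pvStep [] x = [(x, 1)] := by simp [pvStep]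
    rw [List.foldl_cons, hstep, pvAux T hT x 1 hx, PySem.Set.ofList_cons]
    simp only [List.map_cons]
    congr 1
    · simp only [List.count_cons_self, Prod.mk.injEq, true_and]
      push_cast; ring
    · rw [show (PySem.Set.ofList T).discard x = (PySem.Set.ofList T).filter (fun z => !(z == x)) from rfl,
          ← pvOfList_filter]
      apply List.map_congr_left
      intro k hk
      have hkne : k ≠ x := by
        have := (PySem.Set.mem_ofList _ _).1 hk
        simp at this
        exact this.2
      simp [Ne.symm hkne]

theorem pvInsertBy_congr {α : Type} (p q : α → α → Bool) (x : α) (acc : List α)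
    (h : ∀ y ∈ acc, p x y = q x y) :
    PySem.List.insertBy p x acc = PySem.List.insertBy q x acc := by
  induction acc with
  | nil => rfl
  | cons y ys ih =>
    simp only [PySem.List.insertBy]
    rw [h y (by simp)]
    by_cases hq : q x y = true
    · simp [hq]
    · simp only [Bool.not_eq_true] at hq
      simp [hq]
      exact ih (fun z hz => h z (by simp [hz]))

theorem pvFoldl_insertBy_congr {α : Type} (p q : α → α → Bool) (xs acc : List α)
    (hacc : ∀ y ∈ acc, ∀ x ∈ xs, p x y = q x y)
    (hxs : ∀ x ∈ xs, ∀ y ∈ xs, p x y = q x y) :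
    xs.foldl (fun acc x => PySem.List.insertBy p x acc) acc
      = xs.foldl (fun acc x => PySem.List.insertBy q x acc) acc := by
  induction xs generalizing acc with
  | nil => rfl
  | cons x t ih =>
    simp only [List.foldl_cons]
    have hins : PySem.List.insertBy p x acc = PySem.List.insertBy q x acc :=
      pvInsertBy_congr p q x acc (fun y hy => hacc y hy x (by simp))
    rw [hins]
    apply ih
    · intro y hy z hz
      rw [PySem.List.mem_insertBy] at hy
      rcases hy with rfl | hy
      · exact hxs z (by simp [hz]) y (by simp)
      · exact hacc y hy z (by simp [hz])
    · intro a ha b hb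
      exact hxs a (by simp [ha]) b (by simp [hb])

-- sorting with a tuple key = sorting by the first key, when equal firsts force equal elements
theorem pvSorted2_eq_sorted (xs : List (String × Int))
    (h : ∀ a ∈ xs, ∀ b ∈ xs, a.1 = b.1 → a = b) :
    PySem.List.sorted2 xs (fun p => p.1) (fun p => p.2) = PySem.List.sorted xs (fun p => p.1) := by
  show xs.foldl (fun acc x => PySem.List.insertBy _ x acc) []
      = xs.foldl (fun acc x => PySem.List.insertBy _ x acc) []
  apply pvFoldl_insertBy_congr
  · intro y hy; simp at hy
  · intro a ha b hb
    rcases lt_trichotomy a.1 b.1 with hlt | heq | hgt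
    · simp [hlt]
    · have : a = b := h a ha b hb heq
      subst this
      simp
    · simp [hgt, not_lt.2 (le_of_lt hgt)]

theorem pvMain (detections : List (List (String × String))) :
    detections_over_time detections = detections_over_time_alt detections := by
  have hA : detections_over_time detections
      = PySem.List.sorted2 ((PySem.Dict.counter (pvDates detections)).items)
          (fun p => p.1) (fun p => p.2) := by
    unfold detections_over_time
    rw [pvA_fold, PySem.Dict.foldl_insert_getD_add_one_eq_counter]
  set L := pvDates detections with hL
  set S := PySem.List.sorted L (fun x => x) with hS
  have hperm : S.Perm L := PySem.List.sorted_perm L (fun x => x) false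
  have hsorted : S.Pairwise (· ≤ ·) := PySem.List.sorted_pairwise L (fun x => x)
  have hB : detections_over_time_alt detections
      = (PySem.Set.ofList S).map (fun k => (k, (L.count k : Int))) := by
    show S.foldl pvStep [] = _
    rw [pvGroup S hsorted]
    apply List.map_congr_left
    intro k _
    rw [hperm.count_eq]
  have hitems : (PySem.Dict.counter L).items
      = (PySem.Set.ofList L).map (fun k => (k, (L.count k : Int))) :=
    PySem.Dict.items_counter L
  have hpermSet : (PySem.Set.ofList S).Perm (PySem.Set.ofList L) := by
    refine (List.perm_ext_iff_of_nodup (PySem.Set.nodup_ofList S) (PySem.Set.nodup_ofList L)).2 ?_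
    intro a
    rw [PySem.Set.mem_ofList, PySem.Set.mem_ofList]
    exact hperm.mem_iff
  have hpermB : ((PySem.Set.ofList S).map (fun k => (k, (L.count k : Int)))).Perm
      ((PySem.Dict.counter L).items) := by
    rw [hitems]
    exact hpermSet.map _
  have hpwB : ((PySem.Set.ofList S).map (fun k => (k, (L.count k : Int)))).Pairwise
      (fun a b => a.1 < b.1) := by
    refine List.pairwise_map.2 ?_
    exact (pvPairwise_lt_ofList S hsorted).imp (fun {a b} hab => hab)
  rw [hA, hB, hitems]
  rw [pvSorted2_eq_sorted]
  · rw [← hitems]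
    exact PySem.List.sorted_eq_of_perm_of_pairwise_lt _ _ _ hpermB hpwB
  · rw [← hitems]
    intro a ha b hb h1
    rw [hitems] at ha hb
    obtain ⟨ka, _, rfl⟩ := List.mem_map.1 ha
    obtain ⟨kb, _, rfl⟩ := List.mem_map.1 hb
    simp at h1
    simp [h1]

-- ===== VERDICT (by name: the statement is the Claim_ definition above) =====
theorem detections_over_time_spec : Claim_equal_detections_over_time := by
  intro detections _
  unfold Spec_detections_over_time
  exact pvMain detections
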